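-- pv_equiv track=rewrite | github.com/qingchuanli/Step-ppo | recipe/hotpotqa/hotpotqa_agent_flow.py | _format_passage_list
-- ===== SOURCE A (Python) =====
-- def _format_passage_list(passages: list[tuple[str, str]], max_chars: int = 0) -> str:
--     """Format accumulated passages for prompt. Each entry is (query, text)."""
--     if not passages:
--         return "None"
--     lines: list[str] = []
--     total = 0
--     for i, (query, text) in enumerate(passages, start=1):
--         snippet = text[:1200].replace("\n", " ")
--         line = f"[{i}] (query: {query}) {snippet}"
--         if max_chars > 0 and total + len(line) > max_chars:
--             lines.append(f"... ({len(passages) - i + 1} more passages truncated)")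
--             break
--         lines.append(line)
--         total += len(line)
--     return "\n".join(lines)
-- ===== SOURCE B (Python) =====
-- def _format_passage_list(passages: list[tuple[str, str]], max_chars: int = 0) -> str:
--     """Format accumulated passages for prompt. Each entry is (query, text)."""
--     if not passages:
--         return "None"
--     lines = [
--         f"[{i}] (query: {query}) {text[:1200].replace(chr(10), ' ')}"
--         for i, (query, text) in enumerate(passages, start=1)
--     ]
--     cut = None
--     if max_chars > 0:
--         running = 0
--         cums = []
--         for n in map(len, lines):
--             running += n
--             cums.append(running)
--         cut = next((j for j, c in enumerate(cums) if c > max_chars), None)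
--     if cut is None:
--         return "\n".join(lines)
--     return "\n".join(lines[:cut] + [f"... ({len(passages) - cut} more passages truncated)"])
-- ===== Notes on version B (the rewrite author's own statement) =====
-- stated objective: alternative
-- what changed: Replaces A's single interleaved loop (format + running total + break) by a three-stage pipeline: build the full list of formatted lines, scan prefix sums of their lengths for the first cumulative total exceeding max_chars, then slice and optionally append the truncation marker.
import Mathlib
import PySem

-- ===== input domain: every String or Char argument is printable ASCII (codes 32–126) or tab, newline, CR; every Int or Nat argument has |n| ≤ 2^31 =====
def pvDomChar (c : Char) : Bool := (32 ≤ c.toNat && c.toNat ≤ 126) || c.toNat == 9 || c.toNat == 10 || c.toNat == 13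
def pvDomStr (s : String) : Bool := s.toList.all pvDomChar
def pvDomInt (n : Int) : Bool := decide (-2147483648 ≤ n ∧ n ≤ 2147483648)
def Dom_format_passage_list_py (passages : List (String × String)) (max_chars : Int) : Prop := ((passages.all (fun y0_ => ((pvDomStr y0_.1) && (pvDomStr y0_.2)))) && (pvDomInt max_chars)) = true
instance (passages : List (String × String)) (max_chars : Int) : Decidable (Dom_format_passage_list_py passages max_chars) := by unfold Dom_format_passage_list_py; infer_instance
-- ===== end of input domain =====

-- B replaces A's single interleaved loop by a lines-then-prefix-sum-then-slice pipeline (alternative decomposition, same cost).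

-- ===== PORT A =====
-- shared formatting of one entry: f"[{i}] (query: {query}) {text[:1200].replace(chr(10),' ')}"
def pvLine (i : Int) (query text : String) : String :=
  "[" ++ PySem.Int.toStr i ++ "] (query: " ++ query ++ ") "
    ++ PySem.Str.replace (PySem.Str.slice text none (some 1200)) "\n" " "

def pvTrunc (k : Int) : String :=
  "... (" ++ PySem.Int.toStr k ++ " more passages truncated)"

-- A's loop: enumerate with running total, break on first overflow (lines accumulated in order)
def pvALoop (ps : List (String × String)) (i : Int) (n : Int) (max_chars : Int)
    (lines : List String) (total : Int) : List String :=
  match ps with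
  | [] => lines
  | (query, text) :: rest =>
    let line := pvLine i query text
    if max_chars > 0 ∧ total + (PySem.Str.len line : Int) > max_chars then
      lines ++ [pvTrunc (n - i + 1)]
    else
      pvALoop rest (i + 1) n max_chars (lines ++ [line]) (total + (PySem.Str.len line : Int))

def format_passage_list_py (passages : List (String × String)) (max_chars : Int) : String :=
  if passages = [] then "None"
  else PySem.Str.join "\n" (pvALoop passages 1 (passages.length : Int) max_chars [] 0)

-- ===== PORT B =====
-- the list comprehension over enumerate(passages, 1)
def pvBLines (ps : List (String × String)) (i : Int) : List String :=
  match ps with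
  | [] => []
  | (query, text) :: rest => pvLine i query text :: pvBLines rest (i + 1)

-- running prefix sums (cums)
def pvCums (lens : List Int) (running : Int) : List Int :=
  match lens with
  | [] => []
  | l :: rest => (running + l) :: pvCums rest (running + l)

def format_passage_list_py_alt (passages : List (String × String)) (max_chars : Int) : String :=
  if passages = [] then "None"
  else
    let lines := pvBLines passages 1
    let cut : Option Nat :=
      if max_chars > 0 then
        List.findIdx? (fun c => c > max_chars) (pvCums (lines.map (fun l => (PySem.Str.len l : Int))) 0)
      else none
    match cut with
    | none => PySem.Str.join "\n" lines
    | some j => PySem.Str.join "\n" (lines.take j ++ [pvTrunc ((passages.length : Int) - (j : Int))])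

-- ===== PRECONDITION & SPEC =====
def Spec_format_passage_list_py (passages : List (String × String)) (max_chars : Int) (out : String) : Prop := out = format_passage_list_py_alt passages max_chars
instance (passages : List (String × String)) (max_chars : Int) (out : String) : Decidable (Spec_format_passage_list_py passages max_chars out) := by unfold Spec_format_passage_list_py; infer_instance

-- ===== CLAIM (what is proved, stated in full; the proofs are below) =====
def Claim_equal_format_passage_list_py : Prop := ∀ (passages : List (String × String)) (max_chars : Int), Dom_format_passage_list_py passages max_chars → Spec_format_passage_list_py passages max_chars (format_passage_list_py passages max_chars)

-- ===== LEMMAS AND PROOFS =====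

-- loop/pipeline correspondence, generalized over start index, running total and accumulator
lemma pvALoop_eq (mc : Int) :
    ∀ (ps : List (String × String)) (i total n : Int) (acc : List String),
      pvALoop ps i n mc acc total =
        match (if mc > 0 then
                 List.findIdx? (fun c => c > mc)
                   (pvCums ((pvBLines ps i).map (fun l => (PySem.Str.len l : Int))) total)
               else none) with
        | none => acc ++ pvBLines ps i
        | some j => acc ++ (pvBLines ps i).take j ++ [pvTrunc (n - (i + (j : Int)) + 1)] := by
  intro ps
  induction ps with
  | nil =>
    intro i total n acc
    simp only [pvALoop, pvBLines, pvCums, List.map_nil, List.findIdx?_nil, ite_self,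
      List.append_nil]
  | cons hd rest ih =>
    intro i total n acc
    obtain ⟨query, text⟩ := hd
    simp only [pvALoop, pvBLines, pvCums, List.map_cons]
    by_cases hmc : mc > 0
    · by_cases hover : total + (PySem.Str.len (pvLine i query text) : Int) > mc
      · rw [if_pos ⟨hmc, hover⟩, if_pos hmc, List.findIdx?_cons, if_pos (by simpa using hover)]
        simp
      · rw [if_neg (fun h => hover h.2), if_pos hmc, List.findIdx?_cons,
          if_neg (by simpa using hover)]
        rw [ih (i + 1) (total + (PySem.Str.len (pvLine i query text) : Int)) n
              (acc ++ [pvLine i query text]), if_pos hmc]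
        cases hfind : List.findIdx? (fun c => decide (c > mc))
            (pvCums ((pvBLines rest (i + 1)).map (fun l => (PySem.Str.len l : Int)))
              (total + (PySem.Str.len (pvLine i query text) : Int))) with
        | none => simp
        | some j =>
          simp only [Option.map_some, List.take_succ_cons, List.append_assoc,
            List.cons_append]
          have : n - (i + 1 + (j : Int)) + 1 = n - (i + ((j + 1 : Nat) : Int)) + 1 := by
            push_cast; ring
          rw [this]
          simp
    · rw [if_neg (fun h => hmc h.1)]
      rw [ih (i + 1) (total + (PySem.Str.len (pvLine i query text) : Int)) n
            (acc ++ [pvLine i query text]), if_neg hmc, if_neg hmc]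
      simp

-- ===== VERDICT (by name: the statement is the Claim_ definition above) =====
theorem format_passage_list_py_spec : Claim_equal_format_passage_list_py := by
  intro passages max_chars _
  unfold Spec_format_passage_list_py format_passage_list_py format_passage_list_py_alt
  by_cases hnil : passages = []
  · simp [hnil]
  · simp only [hnil, if_false]
    rw [pvALoop_eq max_chars passages 1 0 (passages.length : Int) []]
    cases hfind : (if max_chars > 0 then
        List.findIdx? (fun c => c > max_chars)
          (pvCums ((pvBLines passages 1).map (fun l => (PySem.Str.len l : Int))) 0)
      else none) with
    | none => simp
    | some j =>
      have : (passages.length : Int) - (1 + (j : Int)) + 1 = (passages.length : Int) - (j : Int) := by ring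
      simp [this]
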